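-- pv_equiv track=rewrite | github.com/riven314/Algorithm_Implementation | huffman_coding.py | encode_len
-- ===== SOURCE A (Python) =====
-- def encode_len(merge_str):
--     alpha_dict = {}
--     cnt = 0
--     for i in merge_str:
--         if i == '(':
--             cnt += 1
--         elif i == ')':
--             cnt -= 1
--         else:
--             alpha_dict[i] = cnt
--     return alpha_dict
-- ===== SOURCE B (Python) =====
-- def encode_len(merge_str):
--     return {c: sum(1 if ch == '(' else -1 if ch == ')' else 0 for ch in merge_str[:i])
--             for i, c in enumerate(merge_str) if c != '(' and c != ')'}
-- ===== Notes on version B (the rewrite author's own statement) =====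
-- stated objective: alternative
-- what changed: Replaces the single stateful loop carrying a running counter and mutating dict with a stateless dict comprehension: each kept character's depth is recomputed as the signed sum of paren deltas over the prefix slice before it.
import Mathlib
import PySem

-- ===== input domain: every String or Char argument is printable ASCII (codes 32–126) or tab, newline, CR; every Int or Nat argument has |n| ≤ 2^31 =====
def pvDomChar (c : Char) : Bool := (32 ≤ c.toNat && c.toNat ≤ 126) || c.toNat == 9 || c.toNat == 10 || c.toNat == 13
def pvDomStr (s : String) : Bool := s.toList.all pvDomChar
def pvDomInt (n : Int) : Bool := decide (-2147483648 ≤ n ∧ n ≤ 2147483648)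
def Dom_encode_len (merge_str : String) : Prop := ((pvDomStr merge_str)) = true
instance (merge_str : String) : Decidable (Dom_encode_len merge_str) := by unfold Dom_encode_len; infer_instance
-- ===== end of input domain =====

-- B replaces A's stateful counter loop by a stateless comprehension recomputing each depth
-- from the prefix slice (alternative decomposition; not faster).

-- ===== PORT A =====
-- loop body of A: state is (alpha_dict, cnt)
def pvStepA (st : PySem.Dict String Int × Int) (c : Char) : PySem.Dict String Int × Int :=
  if c = '(' then (st.1, st.2 + 1)
  else if c = ')' then (st.1, st.2 - 1)
  else (st.1.insert (String.ofList [c]) st.2, st.2)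

def encode_len (merge_str : String) : List (String × Int) :=
  (merge_str.toList.foldl pvStepA (PySem.Dict.empty, 0)).1.items

-- ===== PORT B =====
-- delta summed over the prefix slice merge_str[:i]
def pvDelta (ch : Char) : Int := if ch = '(' then 1 else if ch = ')' then -1 else 0

def pvStepB (full : List Char) (d : PySem.Dict String Int) (p : Int × Char) :
    PySem.Dict String Int :=
  if p.2 ≠ '(' ∧ p.2 ≠ ')' then
    d.insert (String.ofList [p.2]) (((PySem.List.slice full none (some p.1)).map pvDelta).sum)
  else d

def encode_len_alt (merge_str : String) : List (String × Int) :=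
  ((PySem.List.enumerate merge_str.toList 0).foldl (pvStepB merge_str.toList)
    PySem.Dict.empty).items

-- ===== PRECONDITION & SPEC =====
def Spec_encode_len (merge_str : String) (out : List (String × Int)) : Prop := out = encode_len_alt merge_str
instance (merge_str : String) (out : List (String × Int)) : Decidable (Spec_encode_len merge_str out) := by unfold Spec_encode_len; infer_instance

-- ===== CLAIM (what is proved, stated in full; the proofs are below) =====
def Claim_equal_encode_len : Prop := ∀ (merge_str : String), Dom_encode_len merge_str → Spec_encode_len merge_str (encode_len merge_str)

-- ===== LEMMAS AND PROOFS =====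
lemma pv_key (full cs : List Char) : ∀ (pre : List Char) (d : PySem.Dict String Int),
    full = pre ++ cs →
    (cs.foldl pvStepA (d, (pre.map pvDelta).sum)).1
      = (PySem.List.enumerate cs (pre.length : Int)).foldl (pvStepB full) d := by
  induction cs with
  | nil => intro pre d _; simp [PySem.List.enumerate_nil]
  | cons c cs ih =>
    intro pre d hfull
    rw [PySem.List.enumerate_cons]
    simp only [List.foldl_cons]
    have hlen : (pre.length : Int) + 1 = ((pre ++ [c]).length : Int) := by
      simp [List.length_append]
    have hsl : PySem.List.slice full none (some (pre.length : Int)) = pre := by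
      rw [PySem.List.slice_to_natCast, hfull, List.take_left]
    by_cases h1 : c = '('
    · subst h1
      have hA : pvStepA (d, (pre.map pvDelta).sum) '(' = (d, ((pre ++ ['(']).map pvDelta).sum) := by
        simp [pvStepA, pvDelta]
      have hB : pvStepB full d ((pre.length : Int), '(') = d := by
        simp [pvStepB]
      rw [hA, hB, hlen, ih (pre ++ ['(']) d (by simpa using hfull)]
    · by_cases h2 : c = ')'
      · subst h2
        have hA : pvStepA (d, (pre.map pvDelta).sum) ')' = (d, ((pre ++ [')']).map pvDelta).sum) := by
          simp [pvStepA, pvDelta, sub_eq_add_neg]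
        have hB : pvStepB full d ((pre.length : Int), ')') = d := by
          simp [pvStepB]
        rw [hA, hB, hlen, ih (pre ++ [')']) d (by simpa using hfull)]
      · have hA : pvStepA (d, (pre.map pvDelta).sum) c
            = (d.insert (String.ofList [c]) ((pre.map pvDelta).sum), ((pre ++ [c]).map pvDelta).sum) := by
          simp [pvStepA, pvDelta, h1, h2]
        have hB : pvStepB full d ((pre.length : Int), c)
            = d.insert (String.ofList [c]) ((pre.map pvDelta).sum) := by
          simp [pvStepB, h1, h2, hsl]
        rw [hA, hB, hlen, ih (pre ++ [c]) _ (by simpa using hfull)]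

-- ===== VERDICT (by name: the statement is the Claim_ definition above) =====
theorem encode_len_spec : Claim_equal_encode_len := by
  intro s _
  unfold Spec_encode_len encode_len encode_len_alt
  have := pv_key s.toList s.toList [] PySem.Dict.empty rfl
  simp only [List.map_nil, List.sum_nil, List.length_nil, Int.natCast_zero] at this
  rw [this]
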